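-- pv_equiv track=rewrite | github.com/yuulabs/yuubot | src/yuubot/capabilities/mem/store.py | parse_ids
-- ===== SOURCE A (Python) =====
-- def parse_ids(parts: list[str] | None) -> list[int]:
--     """Parse memory IDs from positional args, allowing comma/space mixing."""
--     if not parts:
--         return []
--     ids: list[int] = []
--     for part in parts:
--         for token in part.split(","):
--             token = token.strip()
--             if token:
--                 ids.append(int(token))
--     return ids
-- ===== SOURCE B (Python) =====
-- def parse_ids(parts: list[str] | None) -> list[int]:
--     """Parse memory IDs from positional args, allowing comma/space mixing."""
--     if not parts:
--         return []
--     ids: list[int] = []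
--     for part in parts:
--         buf = ""   # current token, leading/trailing whitespace never enters it
--         pend = ""  # whitespace seen after buf; flushed only if more content follows
--         for ch in part:
--             if ch == ",":
--                 if buf:
--                     ids.append(int(buf))
--                 buf = ""
--                 pend = ""
--             elif ch.isspace():
--                 if buf:
--                     pend += ch
--             else:
--                 buf += pend + ch
--                 pend = ""
--         if buf:
--             ids.append(int(buf))
--     return ids
-- ===== Notes on version B (the rewrite author's own statement) =====
-- stated objective: alternative
-- what changed: Replaces the split/strip/int library pipeline with a single-pass character-level state machine: a token buffer plus a pending-whitespace register, emitting int(buf) at each comma and at end of part, so no split or strip call is made at all.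
import Mathlib
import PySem

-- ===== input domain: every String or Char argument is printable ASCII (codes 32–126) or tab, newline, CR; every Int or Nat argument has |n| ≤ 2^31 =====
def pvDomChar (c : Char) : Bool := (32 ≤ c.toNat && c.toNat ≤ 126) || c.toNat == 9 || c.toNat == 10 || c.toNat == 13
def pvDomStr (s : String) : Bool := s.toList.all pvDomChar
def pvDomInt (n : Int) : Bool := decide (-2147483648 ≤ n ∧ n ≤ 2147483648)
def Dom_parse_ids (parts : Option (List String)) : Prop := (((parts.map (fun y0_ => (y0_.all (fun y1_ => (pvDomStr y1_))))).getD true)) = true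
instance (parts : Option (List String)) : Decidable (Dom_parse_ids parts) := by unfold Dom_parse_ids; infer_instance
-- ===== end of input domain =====

-- B replaces A's split/strip/int pipeline by a single-pass character-level state machine
-- (token buffer + pending-whitespace register), emitting at commas and at end of part.

-- ===== PORT A =====
-- literal port of A: nested loops, appending int(token) for each non-empty stripped token
def parse_ids (parts : Option (List String)) : List Int :=
  match parts with
  | none => []
  | some ps =>
    if ps = [] then []
    else
      ps.foldl (fun ids part =>
        (PySem.Chars.splitOn part.toList [',']).foldl (fun ids token =>
          let token := PySem.Chars.strip token
          if token ≠ [] then ids ++ [(PySem.Int.ofChars? token).getD 0] else ids) ids) []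

-- ===== PORT B =====
-- the body of Source B's inner for-loop over the characters of one part (state = (ids, buf, pend))
def pvScanStep (st : List Int × List Char × List Char) (ch : Char) :
    List Int × List Char × List Char :=
  let (ids, buf, pend) := st
  if ch = ',' then
    ((if buf ≠ [] then ids ++ [(PySem.Int.ofChars? buf).getD 0] else ids), [], [])
  else if PySem.Chars.isspace ch then
    (ids, buf, if buf ≠ [] then pend ++ [ch] else pend)
  else
    (ids, buf ++ pend ++ [ch], [])

-- literal port of Source B: one pass over each part's characters with the state machine above
def parse_ids_alt (parts : Option (List String)) : List Int :=
  match parts with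
  | none => []
  | some ps =>
    if ps = [] then []
    else
      ps.foldl (fun ids part =>
        let st := part.toList.foldl pvScanStep (ids, [], [])
        if st.2.1 ≠ [] then st.1 ++ [(PySem.Int.ofChars? st.2.1).getD 0] else st.1) []

-- ===== PRECONDITION & SPEC =====
-- Pre_ excludes exactly the inputs where Python A raises ValueError: some non-empty
-- stripped token is not parseable by int().
def Pre_parse_ids (parts : Option (List String)) : Prop :=
  ∀ p ∈ parts.getD [], ∀ tok ∈ PySem.Chars.splitOn p.toList [','],
    PySem.Chars.strip tok = [] ∨ (PySem.Int.ofChars? (PySem.Chars.strip tok)).isSome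
instance (parts : Option (List String)) : Decidable (Pre_parse_ids parts) := by
  unfold Pre_parse_ids; infer_instance
def pvWitness_parse_ids : Option (List String) := some ["1, 2", " -3,", "4"]

def Spec_parse_ids (parts : Option (List String)) (out : List Int) : Prop := out = parse_ids_alt parts
instance (parts : Option (List String)) (out : List Int) : Decidable (Spec_parse_ids parts out) := by unfold Spec_parse_ids; infer_instance

-- ===== CLAIM (what is proved, stated in full; the proofs are below) =====
def Claim_equal_parse_ids : Prop := ∀ (parts : Option (List String)), Dom_parse_ids parts → Pre_parse_ids parts → Spec_parse_ids parts (parse_ids parts)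

-- ===== LEMMAS AND PROOFS =====

-- prepend `pre` to the head of a token list
def pvConsHead (pre : List Char) : List (List Char) → List (List Char)
  | [] => [pre]
  | h :: t => (pre ++ h) :: t

-- structural recursion equivalent of splitting on ','
def pvSplitComma : List Char → List (List Char)
  | [] => [[]]
  | c :: rest => if c = ',' then [] :: pvSplitComma rest else pvConsHead [c] (pvSplitComma rest)

theorem pvSplitComma_ne_nil (l : List Char) : pvSplitComma l ≠ [] := by
  cases l with
  | nil => simp [pvSplitComma]
  | cons c rest =>
    simp only [pvSplitComma]
    split
    · simp
    · cases h : pvSplitComma rest <;> simp [pvConsHead]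

theorem pvConsHead_append (p q : List Char) (xs : List (List Char)) :
    pvConsHead (p ++ q) xs = pvConsHead p (pvConsHead q xs) := by
  cases xs <;> simp [pvConsHead]

theorem pv_go_eq (fuel : Nat) (l cur : List Char) (acc : List (List Char))
    (hf : l.length ≤ fuel) :
    PySem.Chars.splitOn.go [','] fuel l cur acc
      = acc.reverse ++ pvConsHead cur.reverse (pvSplitComma l) := by
  induction fuel generalizing l cur acc with
  | zero =>
    have : l = [] := by cases l <;> simp_all
    subst this
    simp [PySem.Chars.splitOn.go, pvSplitComma, pvConsHead]
  | succ n ih =>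
    cases l with
    | nil => simp [PySem.Chars.splitOn.go, pvSplitComma, pvConsHead]
    | cons c rest =>
      rw [PySem.Chars.splitOn.go]
      by_cases hc : c = ','
      · subst hc
        have hp : [','].isPrefixOf (',' :: rest) = true := by simp [List.isPrefixOf]
        simp only [hp, if_pos]
        rw [show List.drop [','].length (',' :: rest) = rest from rfl]
        rw [ih rest [] (cur.reverse :: acc) (by simpa using Nat.lt_succ_iff.mp (by simpa using hf))]
        have hne := pvSplitComma_ne_nil rest
        cases hr : pvSplitComma rest with
        | nil => exact absurd hr hne
        | cons h t =>
          simp [pvSplitComma, pvConsHead, hr]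
      · have hp : [','].isPrefixOf (c :: rest) = false := by
          simp [List.isPrefixOf]; exact fun h => absurd h.symm hc
        simp only [hp]
        rw [if_neg (by simp)]
        rw [ih rest (c :: cur) acc (by simpa using Nat.lt_succ_iff.mp (by simpa using hf))]
        simp [pvSplitComma, hc, List.reverse_cons, pvConsHead_append]

theorem pv_splitOn_eq (l : List Char) :
    PySem.Chars.splitOn l [','] = pvSplitComma l := by
  rw [PySem.Chars.splitOn, pv_go_eq _ _ _ _ (by omega)]
  have hne := pvSplitComma_ne_nil l
  cases hr : pvSplitComma l with
  | nil => exact absurd hr hne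
  | cons h t => simp [pvConsHead]

-- the per-part contribution of program A
def pvPartIds (p : List Char) : List Int :=
  (((PySem.Chars.splitOn p [',']).map PySem.Chars.strip).filter (· ≠ [])).map
    (fun t => (PySem.Int.ofChars? t).getD 0)

theorem pv_inner_eq (toks : List (List Char)) (ids : List Int) :
    toks.foldl (fun ids token =>
        let token := PySem.Chars.strip token
        if token ≠ [] then ids ++ [(PySem.Int.ofChars? token).getD 0] else ids) ids
      = ids ++ ((toks.map PySem.Chars.strip).filter (· ≠ [])).map
          (fun t => (PySem.Int.ofChars? t).getD 0) := by
  have hfun : (fun (ids : List Int) token =>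
        let token := PySem.Chars.strip token
        if token ≠ [] then ids ++ [(PySem.Int.ofChars? token).getD 0] else ids)
      = (fun ids token =>
        if (fun tok => decide (PySem.Chars.strip tok ≠ [])) token = true
        then ids ++ [(fun tok => (PySem.Int.ofChars? (PySem.Chars.strip tok)).getD 0) token]
        else ids) := by
    funext ids token; simp
  rw [hfun, PySem.List.foldl_append_if]
  simp [List.filter_map, Function.comp_def]

theorem pv_A_flat (ps : List String) :
    ps.foldl (fun ids part =>
        (PySem.Chars.splitOn part.toList [',']).foldl (fun ids token =>
          let token := PySem.Chars.strip token
          if token ≠ [] then ids ++ [(PySem.Int.ofChars? token).getD 0] else ids) ids) []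
      = ps.flatMap (fun part => pvPartIds part.toList) := by
  have hfun : (fun (ids : List Int) (part : String) =>
        (PySem.Chars.splitOn part.toList [',']).foldl (fun ids token =>
          let token := PySem.Chars.strip token
          if token ≠ [] then ids ++ [(PySem.Int.ofChars? token).getD 0] else ids) ids)
      = (fun ids part => ids ++ (fun part : String => pvPartIds part.toList) part) := by
    funext ids part
    rw [pv_inner_eq]
    rfl
  rw [hfun, PySem.List.foldl_append_eq_flatMap]
  simp

-- ===== B-side lemmas: the scanner computes the strip-filter-int of the comma tokens =====

-- strip lemmas
theorem pv_lstrip_cons_nonws {c : Char} (h : PySem.Chars.isspace c = false) (l : List Char) :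
    PySem.Chars.lstrip (c :: l) = c :: l := by
  simp [PySem.Chars.lstrip, h]

theorem pv_strip_cons_ws {c : Char} (h : PySem.Chars.isspace c = true) (l : List Char) :
    PySem.Chars.strip (c :: l) = PySem.Chars.strip l := by
  simp [PySem.Chars.strip, PySem.Chars.lstrip, h]

theorem pv_rstrip_append_nonws {c : Char} (h : PySem.Chars.isspace c = false) (l : List Char) :
    PySem.Chars.rstrip (l ++ [c]) = l ++ [c] := by
  simp [PySem.Chars.rstrip, h]

theorem pv_rstrip_append_ws (buf pend : List Char)
    (hp : pend.all PySem.Chars.isspace = true)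
    (hb : PySem.Chars.rstrip buf = buf) :
    PySem.Chars.rstrip (buf ++ pend) = buf := by
  unfold PySem.Chars.rstrip at *
  rw [List.reverse_append, List.dropWhile_append]
  have hdrop : List.dropWhile PySem.Chars.isspace pend.reverse = [] := by
    rw [List.dropWhile_eq_nil_iff]
    intro x hx; exact List.all_eq_true.mp hp x (List.mem_reverse.mp hx)
  simp [hdrop, hb]

theorem pv_head_nonws {b : Char} {bs : List Char}
    (h : PySem.Chars.lstrip (b :: bs) = b :: bs) : PySem.Chars.isspace b = false := by
  by_contra hc
  have hb : PySem.Chars.isspace b = true := by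
    cases hx : PySem.Chars.isspace b with
    | false => exact absurd hx hc
    | true => rfl
  unfold PySem.Chars.lstrip at h
  rw [List.dropWhile_cons, if_pos hb] at h
  have := List.length_dropWhile_le (p := PySem.Chars.isspace) (l := bs)
  have : (List.dropWhile PySem.Chars.isspace bs).length = bs.length + 1 := by
    rw [h]; simp
  omega

-- strip of buf ++ pend with the scanner invariant
theorem pv_strip_buf_pend (buf pend : List Char)
    (hp : pend.all PySem.Chars.isspace = true)
    (hemp : buf = [] → pend = [])
    (hl : PySem.Chars.lstrip buf = buf)
    (hr : PySem.Chars.rstrip buf = buf) :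
    PySem.Chars.strip (buf ++ pend) = buf := by
  cases buf with
  | nil =>
    rw [hemp rfl]
    rfl
  | cons b bs =>
    have hb := pv_head_nonws hl
    unfold PySem.Chars.strip
    rw [show (b :: bs) ++ pend = b :: (bs ++ pend) from rfl]
    rw [pv_lstrip_cons_nonws hb]
    exact pv_rstrip_append_ws _ _ hp hr

-- the list of ints contributed by the tail of a part, given a prefix `pre` already consumed
def pvIdsFrom (pre : List Char) (l : List Char) : List Int :=
  (((pvConsHead pre (pvSplitComma l)).map PySem.Chars.strip).filter (· ≠ [])).map
    (fun t => (PySem.Int.ofChars? t).getD 0)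

theorem pvConsHead_nil (xs : List (List Char)) (h : xs ≠ []) : pvConsHead [] xs = xs := by
  cases xs with
  | nil => exact absurd rfl h
  | cons a t => simp [pvConsHead]

theorem pvConsHead_ne_nil (pre : List Char) (xs : List (List Char)) :
    pvConsHead pre xs ≠ [] := by
  cases xs <;> simp [pvConsHead]

-- main scanner lemma
theorem pv_scan_eq (l : List Char) (ids : List Int) (buf pend : List Char)
    (hp : pend.all PySem.Chars.isspace = true)
    (hemp : buf = [] → pend = [])
    (hl : PySem.Chars.lstrip buf = buf)
    (hr : PySem.Chars.rstrip buf = buf) :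
    (let st := l.foldl pvScanStep (ids, buf, pend);
     if st.2.1 ≠ [] then st.1 ++ [(PySem.Int.ofChars? st.2.1).getD 0] else st.1)
      = ids ++ pvIdsFrom (buf ++ pend) l := by
  induction l generalizing ids buf pend with
  | nil =>
    simp only [List.foldl_nil, pvIdsFrom, pvSplitComma, pvConsHead]
    rw [show (buf ++ pend) ++ ([] : List Char) = buf ++ pend by simp]
    rw [show ([buf ++ pend].map PySem.Chars.strip) = [PySem.Chars.strip (buf ++ pend)] from rfl]
    rw [pv_strip_buf_pend buf pend hp hemp hl hr]
    by_cases hb : buf = []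
    · simp [hb]
    · simp [hb]
  | cons c r ih =>
    simp only [List.foldl_cons]
    by_cases hc : c = ','
    · subst hc
      rw [show pvScanStep (ids, buf, pend) ','
            = ((if buf ≠ [] then ids ++ [(PySem.Int.ofChars? buf).getD 0] else ids), [], []) from rfl]
      rw [ih _ [] [] rfl (fun _ => rfl) rfl rfl]
      have hX := pvSplitComma_ne_nil r
      simp only [pvIdsFrom, List.nil_append]
      rw [pvConsHead_nil _ hX,
        show pvSplitComma (',' :: r) = [] :: pvSplitComma r from by simp [pvSplitComma],
        show pvConsHead (buf ++ pend) ([] :: pvSplitComma r)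
            = (buf ++ pend) :: pvSplitComma r from by simp [pvConsHead]]
      simp only [List.map_cons, List.filter_cons]
      rw [pv_strip_buf_pend buf pend hp hemp hl hr]
      by_cases hb : buf = []
      · simp [hb]
      · simp [hb]
    · have hsplit : pvSplitComma (c :: r) = pvConsHead [c] (pvSplitComma r) := by
        simp [pvSplitComma, hc]
      by_cases hws : PySem.Chars.isspace c = true
      · rw [show pvScanStep (ids, buf, pend) c
              = (ids, buf, if buf ≠ [] then pend ++ [c] else pend) from by
            simp [pvScanStep, hc, hws]]
        by_cases hb : buf = []
        · subst hb
          have hpe := hemp rfl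
          subst hpe
          simp only [ne_eq, not_true_eq_false, if_false]
          rw [ih ids [] [] rfl (fun _ => rfl) rfl rfl]
          have hX := pvSplitComma_ne_nil r
          congr 1
          simp only [pvIdsFrom, List.nil_append, hsplit]
          rw [pvConsHead_nil _ hX, pvConsHead_nil _ (pvConsHead_ne_nil _ _)]
          cases hr' : pvSplitComma r with
          | nil => exact absurd hr' hX
          | cons h t =>
            simp only [pvConsHead, List.map_cons, List.filter_cons]
            rw [show [c] ++ h = c :: h from rfl, pv_strip_cons_ws hws]
        · simp only [hb, ne_eq, not_false_eq_true, if_true]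
          rw [ih ids buf (pend ++ [c])
            (by simp_all) (fun h => absurd h hb) hl hr]
          rw [pvIdsFrom, pvIdsFrom, hsplit, ← pvConsHead_append]
          simp
      · have hws' : PySem.Chars.isspace c = false := by
          cases h : PySem.Chars.isspace c with
          | false => rfl
          | true => exact absurd h hws
        rw [show pvScanStep (ids, buf, pend) c = (ids, buf ++ pend ++ [c], []) from by
          simp [pvScanStep, hc, hws']]
        rw [ih ids (buf ++ pend ++ [c]) [] rfl (by simp)
          (by
            cases buf with
            | nil =>
              rw [hemp rfl]
              exact pv_lstrip_cons_nonws hws' []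
            | cons b bs =>
              have hb := pv_head_nonws hl
              rw [show (b :: bs) ++ pend ++ [c] = b :: (bs ++ pend ++ [c]) from by simp]
              exact pv_lstrip_cons_nonws hb _)
          (pv_rstrip_append_nonws hws' _)]
        rw [pvIdsFrom, pvIdsFrom, hsplit, ← pvConsHead_append]
        simp

-- per-part: the scanner yields exactly A's per-part contribution
theorem pv_B_part (ids : List Int) (part : String) :
    (let st := part.toList.foldl pvScanStep (ids, [], [])
     if st.2.1 ≠ [] then st.1 ++ [(PySem.Int.ofChars? st.2.1).getD 0] else st.1)
      = ids ++ pvPartIds part.toList := by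
  rw [pv_scan_eq _ _ [] [] rfl (fun _ => rfl) rfl rfl]
  congr 1
  simp only [pvIdsFrom, pvPartIds, pv_splitOn_eq, List.nil_append]
  rw [pvConsHead_nil _ (pvSplitComma_ne_nil _)]

theorem pv_B_flat (ps : List String) :
    ps.foldl (fun ids part =>
        let st := part.toList.foldl pvScanStep (ids, [], [])
        if st.2.1 ≠ [] then st.1 ++ [(PySem.Int.ofChars? st.2.1).getD 0] else st.1) []
      = ps.flatMap (fun part => pvPartIds part.toList) := by
  have hfun : (fun (ids : List Int) (part : String) =>
        let st := part.toList.foldl pvScanStep (ids, [], [])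
        if st.2.1 ≠ [] then st.1 ++ [(PySem.Int.ofChars? st.2.1).getD 0] else st.1)
      = (fun ids part => ids ++ (fun part : String => pvPartIds part.toList) part) := by
    funext ids part
    exact pv_B_part ids part
  rw [hfun, PySem.List.foldl_append_eq_flatMap]
  simp

-- ===== VERDICT (by name: the statement is the Claim_ definition above) =====
theorem parse_ids_spec : Claim_equal_parse_ids := by
  intro parts _ _
  unfold Spec_parse_ids parse_ids parse_ids_alt
  cases parts with
  | none => rfl
  | some ps =>
    by_cases h : ps = []
    · simp [h]
    · simp only [if_neg h]
      rw [pv_A_flat, pv_B_flat]
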